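-- pv_equiv track=rewrite | github.com/cerdwin/Bio | hidden_m_modelling_genes/main.py | define_genes
-- ===== SOURCE A (Python) =====
-- def define_genes(begin, track):
--     '''
--     Extracts positions of genes through backtrack
--     :param begin:
--     :param track:
--     :return:
--     '''
--     fin = []
--     begins = []
--     adjusted_track = []
--     for i in range(len(track)):
--         for _ in range(3):
--             adjusted_track.append(track[i])
--             if track[i]>=7 or track[i]<=4:
--                 if 3 > adjusted_track[-1] > 1:
--                     begins.append(len(adjusted_track)-1)
--                 break
--     for initials in begins:
--         for i in range(len(adjusted_track)):
--             if adjusted_track[i] >5 and i >=initials and adjusted_track[i]<7: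
--                 fin.append(i)
--                 break
--     return [[begin + begins[i], begin + fin[i]] for i in range(len(begins))] #
-- ===== SOURCE B (Python) =====
-- def define_genes(begin, track):
--     # One pass over `track` computing the *adjusted* positions directly
--     # (values 5/6 occupy 3 slots, everything else 1), collecting the
--     # positions of the 2's (gene starts) and of the 6-blocks (gene ends),
--     # then a two-pointer merge pairs each start with the first 6 at or
--     # after it.  O(N + B) instead of A's O(B * N).
--     twos = []
--     sixes = []
--     pos = 0
--     for t in track:
--         if 5 <= t <= 6:
--             if t == 6:
--                 sixes.append(pos)
--             pos += 3
--         else: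
--             if t == 2:
--                 twos.append(pos)
--             pos += 1
--     res = []
--     p = 0
--     for b in twos:
--         while sixes[p] < b:
--             p += 1
--         res.append([begin + b, begin + sixes[p]])
--     return res
-- ===== Notes on version B (the rewrite author's own statement) =====
-- stated objective: faster
-- what changed: Instead of rebuilding an adjusted track and rescanning it from index 0 for every gene start, B computes start positions and 6-block positions in one pass over track and pairs them with a two-pointer merge.
import Mathlib
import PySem

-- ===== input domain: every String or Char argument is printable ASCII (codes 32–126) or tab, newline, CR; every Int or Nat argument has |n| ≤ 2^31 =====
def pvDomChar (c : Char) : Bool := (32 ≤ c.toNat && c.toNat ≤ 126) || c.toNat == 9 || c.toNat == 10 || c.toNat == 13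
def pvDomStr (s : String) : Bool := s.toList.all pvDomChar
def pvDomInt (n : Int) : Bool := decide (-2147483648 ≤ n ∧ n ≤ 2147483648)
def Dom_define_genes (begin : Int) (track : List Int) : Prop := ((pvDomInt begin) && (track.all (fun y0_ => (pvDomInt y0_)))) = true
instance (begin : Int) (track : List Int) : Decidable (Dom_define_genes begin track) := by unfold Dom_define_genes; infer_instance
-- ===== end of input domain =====

-- B replaces A's rebuild-and-rescan (a fresh scan of the adjusted track per start)
-- by a single pass over track plus a two-pointer merge (objective: faster).

-- ===== PORT A =====
-- first double loop of A: the inner `for _ in range(3)` appends track[i] and breaks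
-- immediately when track[i]>=7 or track[i]<=4 (a data-independent condition), so it
-- appends once in that case and three times otherwise
def pvAFold : List Int → List Int × List Int → List Int × List Int
  | [], st => st
  | t :: ts, (adj, bg) =>
    if t ≥ 7 ∨ t ≤ 4 then
      let adj' := adj ++ [t]
      let last := adj'.getLast?.getD 0      -- adjusted_track[-1]
      pvAFold ts (adj', if 3 > last ∧ last > 1 then bg ++ [(adj'.length : Int) - 1] else bg)
    else
      pvAFold ts (adj ++ [t, t, t], bg)

-- A's second loop: `for i in range(len(adjusted_track))` with break = first index
-- i ≥ initials whose value v satisfies v > 5 and v < 7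
def pvScan (initials : Int) : List Int → Int → Option Int
  | [], _ => none
  | v :: rest, i => if v > 5 ∧ i ≥ initials ∧ v < 7 then some i else pvScan initials rest (i + 1)

def define_genes (begin : Int) (track : List Int) : List (List Int) :=
  let st := pvAFold track ([], [])
  let fin := st.2.foldl (fun fin b =>
    match pvScan b st.1 0 with
    | some i => fin ++ [i]
    | none => fin) []
  (List.range st.2.length).map (fun i => [begin + st.2.getD i 0, begin + fin.getD i 0])

-- ===== PORT B =====
-- one pass: collect adjusted positions of 2's (twos) and of 6-blocks (sixes)
def pvBFold : List Int → List Int × List Int × Int → List Int × List Int × Int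
  | [], st => st
  | t :: ts, (sx, tw, pos) =>
    if 5 ≤ t ∧ t ≤ 6 then
      pvBFold ts ((if t = 6 then sx ++ [pos] else sx), tw, pos + 3)
    else
      pvBFold ts (sx, (if t = 2 then tw ++ [pos] else tw), pos + 1)

-- two-pointer merge (the advancing pointer p is represented by dropping the
-- consumed prefix of sixes); Python raises IndexError when sixes runs out,
-- which Pre_ excludes
def pvMerge (begin : Int) : List Int → List Int → List (List Int)
  | _, [] => []
  | [], _ :: _ => []
  | s :: ss, b :: bs =>
    if s < b then pvMerge begin ss (b :: bs)
    else [begin + b, begin + s] :: pvMerge begin (s :: ss) bs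
termination_by sx tw => sx.length + tw.length

def define_genes_alt (begin : Int) (track : List Int) : List (List Int) :=
  let st := pvBFold track ([], [], 0)
  pvMerge begin st.1 st.2.1

-- ===== PRECONDITION & SPEC =====
-- Pre_ excludes exactly the inputs on which A raises IndexError (fin[i] out of
-- range): tracks containing a 2 with no 6 after it.  B raises IndexError there too.
def Pre_define_genes (begin : Int) (track : List Int) : Prop :=
  ∀ j, j < track.length → track.getD j 0 = 2 →
    ∃ k, k < track.length ∧ j < k ∧ track.getD k 0 = 6
instance (begin : Int) (track : List Int) : Decidable (Pre_define_genes begin track) := by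
  unfold Pre_define_genes; infer_instance

def pvWitness_define_genes : Int × List Int := (5, [2, 1, 6, 2, 7, 6])

def Spec_define_genes (begin : Int) (track : List Int) (out : List (List Int)) : Prop := out = define_genes_alt begin track
instance (begin : Int) (track : List Int) (out : List (List Int)) : Decidable (Spec_define_genes begin track out) := by unfold Spec_define_genes; infer_instance

-- ===== CLAIM (what is proved, stated in full; the proofs are below) =====
def Claim_equal_define_genes : Prop := ∀ (begin : Int) (track : List Int), Dom_define_genes begin track → Pre_define_genes begin track → Spec_define_genes begin track (define_genes begin track)

-- ===== LEMMAS AND PROOFS =====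

-- canonical closed forms of the two folds
def adjF : List Int → List Int :=
  List.flatMap (fun t => if 5 ≤ t ∧ t ≤ 6 then [t, t, t] else [t])

def twosF : List Int → Int → List Int
  | [], _ => []
  | t :: ts, off =>
    if 5 ≤ t ∧ t ≤ 6 then twosF ts (off + 3)
    else (if t = 2 then [off] else []) ++ twosF ts (off + 1)

def sixesF : List Int → Int → List Int
  | [], _ => []
  | t :: ts, off =>
    if 5 ≤ t ∧ t ≤ 6 then (if t = 6 then [off] else []) ++ sixesF ts (off + 3)
    else sixesF ts (off + 1)

theorem pvAFold_eq (ts : List Int) : ∀ (adj bg : List Int),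
    pvAFold ts (adj, bg) = (adj ++ adjF ts, bg ++ twosF ts (adj.length : Int)) := by
  induction ts with
  | nil => intro adj bg; simp [pvAFold, adjF, twosF]
  | cons t ts ih =>
    intro adj bg
    by_cases h : 5 ≤ t ∧ t ≤ 6
    · have h' : ¬ (t ≥ 7 ∨ t ≤ 4) := by omega
      have hstep : pvAFold (t :: ts) (adj, bg) = pvAFold ts (adj ++ [t, t, t], bg) := by
        simp [pvAFold, h']
      rw [hstep, ih]
      simp only [adjF, List.flatMap_cons, twosF, if_pos h, Prod.mk.injEq]
      refine ⟨by simp, ?_⟩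
      congr 1
      simp only [List.length_append, List.length_cons, List.length_nil]
      push_cast
      ring
    · have h' : t ≥ 7 ∨ t ≤ 4 := by omega
      have hstep : pvAFold (t :: ts) (adj, bg) =
          pvAFold ts (adj ++ [t],
            if 3 > t ∧ t > 1 then bg ++ [((adj ++ [t]).length : Int) - 1] else bg) := by
        simp [pvAFold, h']
      rw [hstep, ih]
      simp only [adjF, List.flatMap_cons, twosF, if_neg h, Prod.mk.injEq]
      have hlen : (((adj ++ [t]).length : Nat) : Int) = (adj.length : Int) + 1 := by
        simp
      by_cases h2 : 3 > t ∧ t > 1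
      · have ht2 : t = 2 := by omega
        rw [if_pos h2, if_pos ht2, hlen]
        refine ⟨by simp, ?_⟩
        rw [show (adj.length : Int) + 1 - 1 = (adj.length : Int) from by ring]
        simp
      · have ht2 : ¬ (t = 2) := by omega
        rw [if_neg h2, if_neg ht2, hlen]
        exact ⟨by simp, by simp⟩

theorem pvBFold_eq (ts : List Int) : ∀ (sx tw : List Int) (pos : Int),
    ((pvBFold ts (sx, tw, pos)).1 = sx ++ sixesF ts pos ∧
     (pvBFold ts (sx, tw, pos)).2.1 = tw ++ twosF ts pos) := by
  induction ts with
  | nil => intro sx tw pos; simp [pvBFold, sixesF, twosF]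
  | cons t ts ih =>
    intro sx tw pos
    by_cases h : 5 ≤ t ∧ t ≤ 6
    · simp only [pvBFold, if_pos h, ih, sixesF, twosF, if_pos h]
      by_cases h6 : t = 6 <;> simp [h6]
    · simp only [pvBFold, if_neg h, ih, sixesF, twosF, if_neg h]
      by_cases h2 : t = 2 <;> simp [h2]

theorem twosF_lb (ts : List Int) : ∀ (off b : Int), b ∈ twosF ts off → off ≤ b := by
  induction ts with
  | nil => intro off b hb; simp [twosF] at hb
  | cons t ts ih =>
    intro off b hb
    by_cases h : 5 ≤ t ∧ t ≤ 6
    · simp only [twosF, if_pos h] at hb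
      have := ih _ _ hb; omega
    · simp only [twosF, if_neg h, List.mem_append] at hb
      rcases hb with hb | hb
      · by_cases h2 : t = 2 <;> simp [h2] at hb
        omega
      · have := ih _ _ hb; omega

theorem sixesF_lb (ts : List Int) : ∀ (off s : Int), s ∈ sixesF ts off → off ≤ s := by
  induction ts with
  | nil => intro off s hs; simp [sixesF] at hs
  | cons t ts ih =>
    intro off s hs
    by_cases h : 5 ≤ t ∧ t ≤ 6
    · simp only [sixesF, if_pos h, List.mem_append] at hs
      rcases hs with hs | hs
      · by_cases h6 : t = 6 <;> simp [h6] at hs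
        omega
      · have := ih _ _ hs; omega
    · simp only [sixesF, if_neg h] at hs
      have := ih _ _ hs; omega

theorem twosF_pairwise (ts : List Int) : ∀ (off : Int), List.Pairwise (· ≤ ·) (twosF ts off) := by
  induction ts with
  | nil => intro off; simp [twosF]
  | cons t ts ih =>
    intro off
    by_cases h : 5 ≤ t ∧ t ≤ 6
    · simp only [twosF, if_pos h]; exact ih _
    · simp only [twosF, if_neg h]
      by_cases h2 : t = 2
      · rw [if_pos h2, List.singleton_append, List.pairwise_cons]
        exact ⟨fun b hb => by have := twosF_lb ts _ _ hb; omega, ih _⟩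
      · simp only [if_neg h2, List.nil_append]
        exact ih _

-- a 6 in the track yields a member of sixesF
theorem sixesF_mem (ts : List Int) : ∀ (off : Int) (k : Nat), k < ts.length →
    ts.getD k 0 = 6 → ∃ s, s ∈ sixesF ts off := by
  induction ts with
  | nil => intro off k hk; simp at hk
  | cons t ts ih =>
    intro off k hk h6
    cases k with
    | zero =>
      simp at h6
      subst h6
      exact ⟨off, by simp [sixesF]⟩
    | succ k =>
      simp at hk h6
      by_cases h : 5 ≤ t ∧ t ≤ 6
      · obtain ⟨s, hs⟩ := ih (off + 3) k hk h6
        exact ⟨s, by simp [sixesF, if_pos h, hs]⟩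
      · obtain ⟨s, hs⟩ := ih (off + 1) k hk h6
        exact ⟨s, by simp [sixesF, if_neg h, hs]⟩

-- Pre_ ⇒ every recorded start has a six-block at or after it
theorem pre_to_exists (ts : List Int) : ∀ (off : Int),
    (∀ j, j < ts.length → ts.getD j 0 = 2 →
      ∃ k, k < ts.length ∧ j < k ∧ ts.getD k 0 = 6) →
    ∀ b ∈ twosF ts off, ∃ s ∈ sixesF ts off, b ≤ s := by
  induction ts with
  | nil => intro off _ b hb; simp [twosF] at hb
  | cons t ts ih =>
    intro off H b hb
    have H' : ∀ j, j < ts.length → ts.getD j 0 = 2 →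
        ∃ k, k < ts.length ∧ j < k ∧ ts.getD k 0 = 6 := by
      intro j hj h2
      obtain ⟨k, hk, hjk, h6⟩ := H (j + 1) (by simpa using hj) (by simpa using h2)
      match k, hjk with
      | k + 1, hjk => exact ⟨k, by simpa using hk, by omega, by simpa using h6⟩
    by_cases h : 5 ≤ t ∧ t ≤ 6
    · simp only [twosF, if_pos h] at hb
      obtain ⟨s, hs, hbs⟩ := ih (off + 3) H' b hb
      exact ⟨s, by simp [sixesF, if_pos h, hs], hbs⟩
    · simp only [twosF, if_neg h, List.mem_append] at hb
      rcases hb with hb | hb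
      · by_cases h2 : t = 2
        · rw [if_pos h2, List.mem_singleton] at hb
          subst hb
          obtain ⟨k, hk, _, h6⟩ := H 0 (by simp) (by simpa using h2)
          match k with
          | k + 1 =>
            obtain ⟨s, hs⟩ := sixesF_mem ts (b + 1) k (by simpa using hk) (by simpa using h6)
            have := sixesF_lb ts (b + 1) s hs
            exact ⟨s, by simp [sixesF, if_neg h, hs], by omega⟩
        · simp [h2] at hb
      · obtain ⟨s, hs, hbs⟩ := ih (off + 1) H' b hb
        exact ⟨s, by simp [sixesF, if_neg h, hs], hbs⟩

-- A's scan over the adjusted track = lookup of the first six-block at or after b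
theorem scan_eq_find (ts : List Int) : ∀ (off b : Int),
    (b ≤ off ∨ b ∈ twosF ts off) →
    pvScan b (adjF ts) off = (sixesF ts off).find? (fun s => decide (b ≤ s)) := by
  induction ts with
  | nil => intro off b _; simp [adjF, sixesF, pvScan]
  | cons t ts ih =>
    intro off b hb
    by_cases h : 5 ≤ t ∧ t ≤ 6
    · have hadj : adjF (t :: ts) = t :: t :: t :: adjF ts := by
        simp [adjF, if_pos h]
      by_cases h6 : t = 6
      · subst h6
        rw [hadj]
        simp only [twosF, if_pos h] at hb
        by_cases hbo : b ≤ off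
        · have hc : (6:Int) > 5 ∧ off ≥ b ∧ (6:Int) < 7 := by omega
          simp only [pvScan, if_pos hc, sixesF, if_pos h]
          simp [hbo]
        · have hb3 : b ∈ twosF ts (off + 3) := by tauto
          have hlb := twosF_lb ts _ _ hb3
          have c0 : ¬ ((6:Int) > 5 ∧ off ≥ b ∧ (6:Int) < 7) := by omega
          have c1 : ¬ ((6:Int) > 5 ∧ off + 1 ≥ b ∧ (6:Int) < 7) := by omega
          have c2 : ¬ ((6:Int) > 5 ∧ off + 1 + 1 ≥ b ∧ (6:Int) < 7) := by omega
          simp only [pvScan, if_neg c0, if_neg c1, if_neg c2, sixesF, if_pos h]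
          have h3 : off + 1 + 1 + 1 = off + 3 := by ring
          rw [h3, ih (off + 3) b (Or.inr hb3)]
          simp [show ¬ (b ≤ off) from by omega]
      · have h5 : t = 5 := by omega
        subst h5
        rw [hadj]
        simp only [twosF, if_pos h] at hb
        have c0 : ¬ ((5:Int) > 5 ∧ off ≥ b ∧ (5:Int) < 7) := by omega
        have c1 : ¬ ((5:Int) > 5 ∧ off + 1 ≥ b ∧ (5:Int) < 7) := by omega
        have c2 : ¬ ((5:Int) > 5 ∧ off + 1 + 1 ≥ b ∧ (5:Int) < 7) := by omega
        have h6' : ¬ ((5:Int) = 6) := by omega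
        simp only [pvScan, if_neg c0, if_neg c1, if_neg c2, sixesF, if_pos h, if_neg h6',
          List.nil_append]
        have h3 : off + 1 + 1 + 1 = off + 3 := by ring
        rw [h3]
        refine ih (off + 3) b ?_
        rcases hb with hb | hb
        · exact Or.inl (by omega)
        · exact Or.inr hb
    · have hadj : adjF (t :: ts) = t :: adjF ts := by simp [adjF, if_neg h]
      rw [hadj]
      have c : ¬ (t > 5 ∧ off ≥ b ∧ t < 7) := by omega
      simp only [pvScan, if_neg c, sixesF, if_neg h]
      refine ih (off + 1) b ?_
      simp only [twosF, if_neg h, List.mem_append] at hb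
      rcases hb with hb | hb
      · exact Or.inl (by omega)
      rcases hb with hb | hb
      · by_cases h2 : t = 2 <;> simp [h2] at hb
        exact Or.inl (by omega)
      · exact Or.inr hb

-- correctness of the two-pointer merge
theorem merge_eq (begin : Int) (sx tw : List Int)
    (hpw : List.Pairwise (· ≤ ·) tw)
    (hex : ∀ b ∈ tw, ∃ s ∈ sx, b ≤ s) :
    pvMerge begin sx tw =
      tw.map (fun b => [begin + b, begin + ((sx.find? (fun s => decide (b ≤ s))).getD 0)]) := by
  fun_induction pvMerge begin sx tw with
  | case1 sx => simp
  | case2 b bs =>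
    obtain ⟨s, hs, _⟩ := hex b (by simp)
    simp at hs
  | case3 s ss b bs hsb ih =>
    have hble : ∀ b' ∈ b :: bs, b ≤ b' := by
      intro b' hb'
      rcases List.mem_cons.mp hb' with h | h
      · omega
      · exact List.rel_of_pairwise_cons hpw h
    have hskip : ∀ b' ∈ b :: bs, (decide (b' ≤ s)) = false := by
      intro b' hb'
      have := hble b' hb'
      simp
      omega
    have hex' : ∀ b' ∈ b :: bs, ∃ s' ∈ ss, b' ≤ s' := by
      intro b' hb'
      obtain ⟨s', hs', hle⟩ := hex b' hb'
      rcases List.mem_cons.mp hs' with h | h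
      · subst h
        have := hble b' hb'
        omega
      · exact ⟨s', h, hle⟩
    rw [ih hpw hex']
    refine List.map_congr_left ?_
    intro b' hb'
    rw [List.find?_cons, hskip b' hb']
  | case4 s ss b bs hsb ih =>
    have hfind : ((s :: ss).find? (fun s' => decide (b ≤ s'))).getD 0 = s := by
      rw [List.find?_cons]
      have : (decide (b ≤ s)) = true := by simp; omega
      rw [this]
      rfl
    rw [List.map_cons, hfind]
    congr 1
    exact ih (List.pairwise_cons.mp hpw).2 (fun b' hb' => hex b' (by simp [hb']))

-- the fin-building foldl, when every scan succeeds, is a map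
theorem foldl_opt (f : Int → Option Int) : ∀ (l acc : List Int),
    (∀ b ∈ l, (f b).isSome) →
    l.foldl (fun fin b => match f b with | some i => fin ++ [i] | none => fin) acc
      = acc ++ l.map (fun b => (f b).getD 0) := by
  intro l
  induction l with
  | nil => intro acc _; simp
  | cons b bs ih =>
    intro acc hall
    obtain ⟨i, hi⟩ := Option.isSome_iff_exists.mp (hall b (by simp))
    simp only [List.foldl_cons, List.map_cons, hi]
    rw [ih (acc ++ [i]) (fun b' hb' => hall b' (by simp [hb']))]
    simp [hi]

-- the final comprehension over indices is a zip of begins with their scans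
theorem range_map_pair (c : Int) (xs : List Int) (g : Int → Int) :
    (List.range xs.length).map (fun i => [c + xs.getD i 0, c + (xs.map g).getD i 0])
      = xs.map (fun b => [c + b, c + g b]) := by
  apply List.ext_getElem
  · simp
  · intro i h1 h2
    simp only [List.length_map, List.length_range] at h2
    rw [List.getElem_map, List.getElem_map, List.getElem_range]
    rw [List.getD_eq_getElem _ _ h2, List.getD_eq_getElem _ _ (by simpa using h2),
      List.getElem_map]

-- ===== VERDICT (by name: the statement is the Claim_ definition above) =====
theorem define_genes_spec : Claim_equal_define_genes := by
  intro begin track _ hpre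
  unfold Spec_define_genes
  have hA := pvAFold_eq track [] []
  have hB := pvBFold_eq track [] [] 0
  simp only [List.length_nil, Nat.cast_zero, List.nil_append] at hA
  simp only [List.nil_append] at hB
  simp only [define_genes, define_genes_alt, hA, hB.1, hB.2]
  have hex : ∀ b ∈ twosF track 0, ∃ s ∈ sixesF track 0, b ≤ s :=
    pre_to_exists track 0 hpre
  have hscan : ∀ b ∈ twosF track 0,
      pvScan b (adjF track) 0 = (sixesF track 0).find? (fun s => decide (b ≤ s)) :=
    fun b hb => scan_eq_find track 0 b (Or.inr hb)
  have hsome : ∀ b ∈ twosF track 0, (pvScan b (adjF track) 0).isSome := by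
    intro b hb
    rw [hscan b hb, List.find?_isSome]
    obtain ⟨s, hs, hbs⟩ := hex b hb
    exact ⟨s, hs, by simpa using hbs⟩
  rw [foldl_opt (fun b => pvScan b (adjF track) 0) (twosF track 0) [] hsome]
  simp only [List.nil_append]
  rw [range_map_pair begin (twosF track 0) (fun b => (pvScan b (adjF track) 0).getD 0)]
  rw [merge_eq begin (sixesF track 0) (twosF track 0) (twosF_pairwise track 0) hex]
  refine List.map_congr_left ?_
  intro b hb
  rw [hscan b hb]
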